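-- pv_equiv track=rewrite | github.com/In-Yeong/baekjoon | 이차원 배열과 연산.py | func
-- ===== SOURCE A (Python) =====
-- def func(B, ga, se):    # 가로로 한 줄씩 연산 실행하고 결과 반환
--     newlist = [[] for _ in range(ga)]   # 저장할 리스트
--     maxi = 0    # 세로 최대값을 갱신
--     for i in range(ga):
--         mydict = dict()     # 라인 별 숫자를 세기 위한 딕셔너리
--         for j in range(se):
--             if B[i][j] != 0:    # 0은 무시한다
--                 if B[i][j] in mydict:   # 값이 있을 경우 +1 한다
--                     mydict[B[i][j]] += 1
--                 else:   # 값이 없을 경우 1을 배치한다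
--                     mydict[B[i][j]] = 1
--         mylist = list(mydict.items())   # (key, value) 저장
--         mylist.sort(key=lambda x: (x[1], x[0])) # value 오름차순으로 정렬 후 value가 같다면 key 오름차순으로 정렬
--         newlist[i] = [item for l in mylist for item in list(l)]     # 튜플을 제거한다
--         if len(newlist[i]) > 100:   # 100개가 넘어가면 100개까지만 자른다
--             newlist[i] = newlist[i][:100]
--         if len(newlist[i]) > maxi:  # maxi 갱신
--             maxi = len(newlist[i])
--     for i in range(ga):     # maxi 길이에 미치지 못하는 리스트는 그 차만큼 0을 추가한다
--         cha = maxi - len(newlist[i])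
--         if cha > 0:
--             newlist[i] += [0] * cha
--     se = maxi   # 세로값을 maxi로 갱신
--     return (newlist, ga, se)
-- ===== SOURCE B (Python) =====
-- def func(B, ga, se):
--     rows = []
--     for i in range(ga):
--         cnt = {}
--         for j in range(se):
--             v = B[i][j]
--             if v != 0:
--                 cnt[v] = cnt.get(v, 0) + 1
--         buckets = {}
--         for v, c in cnt.items():
--             buckets.setdefault(c, []).append(v)
--         row = []
--         for c in range(1, se + 1):
--             for v in sorted(buckets.get(c, [])):
--                 row.append(v)
--                 row.append(c)
--         rows.append(row[:100])
--     maxi = 0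
--     for r in rows:
--         maxi = max(maxi, len(r))
--     return ([r + [0] * (maxi - len(r)) for r in rows], ga, maxi)
-- ===== Notes on version B (the rewrite author's own statement) =====
-- stated objective: alternative
-- what changed: Replaces the per-row tuple-key sort of (value,count) dict items by a counting-sort: values are grouped into buckets keyed by their frequency and emitted by scanning frequencies 1..se with each bucket's values in ascending order; rows are capped to 100 unconditionally and padding/max-length are computed in separate passes over the finished rows.
import Mathlib
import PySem

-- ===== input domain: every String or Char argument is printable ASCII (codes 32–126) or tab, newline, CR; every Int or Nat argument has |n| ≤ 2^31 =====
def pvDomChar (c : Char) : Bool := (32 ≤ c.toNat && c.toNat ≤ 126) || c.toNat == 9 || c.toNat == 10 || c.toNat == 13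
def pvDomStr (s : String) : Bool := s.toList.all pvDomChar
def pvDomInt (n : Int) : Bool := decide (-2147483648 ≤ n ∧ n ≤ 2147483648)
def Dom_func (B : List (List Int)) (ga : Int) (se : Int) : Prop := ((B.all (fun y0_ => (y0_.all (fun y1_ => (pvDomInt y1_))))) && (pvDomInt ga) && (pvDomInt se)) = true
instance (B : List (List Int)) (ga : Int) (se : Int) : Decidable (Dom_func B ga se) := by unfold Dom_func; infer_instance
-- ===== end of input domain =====

-- B replaces A's per-row tuple-key sort of dict items by a counting-sort over frequency buckets
-- (values grouped by count, emitted count-ascending then value-ascending); same return value.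

-- ===== PORT A =====
-- body of A's first loop: the flattened, sorted, truncated row for line i
def funcRow (B : List (List Int)) (se : Int) (i : Int) : List Int :=
  let mydict := (PySem.List.pyRange 0 se 1).foldl (fun (d : PySem.Dict Int Int) j =>
      if PySem.List.pyGetD (PySem.List.pyGetD B i []) j 0 ≠ 0 then
        if d.contains (PySem.List.pyGetD (PySem.List.pyGetD B i []) j 0) then
          d.modify (PySem.List.pyGetD (PySem.List.pyGetD B i []) j 0) 0 (· + 1)
        else d.insert (PySem.List.pyGetD (PySem.List.pyGetD B i []) j 0) 1
      else d) PySem.Dict.empty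
  let mylist := PySem.List.sorted2 mydict.items (fun x => x.2) (fun x => x.1)
  let row := mylist.flatMap (fun l => [l.1, l.2])
  if ((row.length : Int) > 100) then PySem.List.slice row none (some 100) else row

def func (B : List (List Int)) (ga : Int) (se : Int) : List (List Int) × Int × Int :=
  let newlist0 : List (List Int) := (PySem.List.pyRange 0 ga 1).map (fun _ => ([] : List Int))
  let st := (PySem.List.pyRange 0 ga 1).foldl (fun (st : List (List Int) × Int) i =>
      let row := funcRow B se i
      let nl := PySem.List.pySetD st.1 i row
      (nl, if ((row.length : Int) > st.2) then (row.length : Int) else st.2)) (newlist0, 0)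
  let newlist := (PySem.List.pyRange 0 ga 1).foldl (fun nl i =>
      let cha := st.2 - ((PySem.List.pyGetD nl i []).length : Int)
      if cha > 0 then PySem.List.pySetD nl i (PySem.List.pyGetD nl i [] ++ PySem.List.pyRepeat [(0 : Int)] cha)
      else nl) st.1
  (newlist, ga, st.2)

-- ===== PORT B =====
-- B's per-row counting-sort: count nonzero values, bucket values by frequency,
-- emit buckets for c = 1..se with values ascending, cap at 100
def funcRowAlt (B : List (List Int)) (se : Int) (i : Int) : List Int :=
  let cnt := (PySem.List.pyRange 0 se 1).foldl (fun (d : PySem.Dict Int Int) j =>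
      let v := PySem.List.pyGetD (PySem.List.pyGetD B i []) j 0
      if v ≠ 0 then d.insert v (d.getD v 0 + 1) else d) PySem.Dict.empty
  let buckets := cnt.items.foldl (fun (b : PySem.Dict Int (List Int)) p =>
      b.modify p.2 [] (· ++ [p.1])) PySem.Dict.empty
  let row := (PySem.List.pyRange 1 (se + 1) 1).foldl (fun acc c =>
      (PySem.List.sorted (buckets.getD c []) (fun x => x) false).foldl (fun a v => a ++ [v, c]) acc) []
  PySem.List.slice row none (some 100)

def func_alt (B : List (List Int)) (ga : Int) (se : Int) : List (List Int) × Int × Int :=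
  let rows := (PySem.List.pyRange 0 ga 1).map (fun i => funcRowAlt B se i)
  let maxi := rows.foldl (fun m r => max m ((r.length : Int))) 0
  (rows.map (fun r => r ++ List.replicate (maxi - (r.length : Int)).toNat 0), ga, maxi)

-- ===== PRECONDITION & SPEC =====
-- Pre_ excludes exactly the inputs on which A raises IndexError: if 0 < se it reads B[i][j]
-- for 0 ≤ i < ga, 0 ≤ j < se, so ga must not exceed len(B) and the first ga rows must have
-- length ≥ se; if se ≤ 0 the inner loop is empty and A never indexes B, so nothing is required.
def Pre_func (B : List (List Int)) (ga : Int) (se : Int) : Prop :=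
  0 < se → (ga ≤ (B.length : Int) ∧ ∀ row ∈ B.take ga.toNat, se ≤ (row.length : Int))
instance (B : List (List Int)) (ga : Int) (se : Int) : Decidable (Pre_func B ga se) := by unfold Pre_func; infer_instance
def pvWitness_func : List (List Int) × Int × Int := ([[1, 1, 2], [0, 5, 5]], 2, 3)

def Spec_func (B : List (List Int)) (ga : Int) (se : Int) (out : List (List Int) × Int × Int) : Prop := out = func_alt B ga se
instance (B : List (List Int)) (ga : Int) (se : Int) (out : List (List Int) × Int × Int) : Decidable (Spec_func B ga se out) := by unfold Spec_func; infer_instance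

-- ===== CLAIM (what is proved, stated in full; the proofs are below) =====
def Claim_equal_func : Prop := ∀ (B : List (List Int)) (ga : Int) (se : Int), Dom_func B ga se → Pre_func B ga se → Spec_func B ga se (func B ga se)

-- ===== LEMMAS AND PROOFS =====

-- a fold whose body is guarded by `if p v` is the fold over the filtered list
theorem pv_foldl_filter_if {α β : Type} (p : α → Prop) [DecidablePred p] (h : β → α → β)
    (t : List α) (init : β) :
    t.foldl (fun d v => if p v then h d v else d) init
      = (t.filter (fun v => decide (p v))).foldl h init := by
  induction t generalizing init with
  | nil => rfl
  | cons x xs ih =>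
    by_cases hx : p x <;> simp [hx, ih]

-- a fold over range(0, se) reading row[j] is the fold over row.take se (if se ≤ len row)
theorem pv_foldl_range_get {β : Type} (row : List Int) (se : Int) (hse : se ≤ (row.length : Int))
    (f : β → Int → β) (init : β) :
    (PySem.List.pyRange 0 se 1).foldl (fun acc j => f acc (PySem.List.pyGetD row j 0)) init
      = (row.take se.toNat).foldl f init := by
  by_cases h : se ≤ 0
  · rw [PySem.List.pyRange_one_eq_nil h]
    have : se.toNat = 0 := Int.toNat_of_nonpos h
    simp [this]
  · replace h : 0 < se := by omega
    have hlen : ((row.take se.toNat).length : Int) = se := by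
      simp [List.length_take]
      omega
    have := PySem.List.foldl_pyRange_zero_pyGetD' (row.take se.toNat) 0 f init
    rw [hlen] at this
    rw [← this]
    apply PySem.List.foldl_congr_mem
    intro acc j hj
    rw [PySem.List.mem_pyRange_one] at hj
    have h1 : PySem.List.pyGetD row j 0 = row[j.toNat]'(by omega) := by
      apply PySem.List.pyGetD_eq_getElem <;> omega
    have h2 : PySem.List.pyGetD (row.take se.toNat) j 0 = (row.take se.toNat)[j.toNat]'(by simp; omega) := by
      apply PySem.List.pyGetD_eq_getElem <;> omega
    rw [h1, h2]
    congr 1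
    exact List.getElem_take.symm

-- A's "if contains then modify else insert 1" is exactly Counter's modify step
theorem pv_dictA_step (d : PySem.Dict Int Int) (v : Int) :
    (if d.contains v then d.modify v 0 (· + 1) else d.insert v 1) = d.modify v 0 (· + 1) := by
  by_cases h : d.contains v = true
  · simp [h]
  · simp only [Bool.not_eq_true] at h
    rw [PySem.Dict.modify, PySem.Dict.getD_of_not_contains d 0 h]
    simp [h]

-- sorted2 with keys (k1, k2) is sorted with the lexicographic key
theorem pv_sorted2_eq_sorted_lex {α : Type} (xs : List α) (k1 k2 : α → Int) :
    PySem.List.sorted2 xs k1 k2 false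
      = PySem.List.sorted xs (fun x => toLex (k1 x, k2 x)) false := by
  show xs.foldl (fun acc x => PySem.List.insertBy _ x acc) []
      = xs.foldl (fun acc x => PySem.List.insertBy _ x acc) []
  congr 1
  funext acc x
  congr 1
  funext a b
  simp only [Prod.Lex.toLex_lt_toLex]
  by_cases h1 : k1 a < k1 b <;> by_cases h2 : k1 b < k1 a <;> by_cases h3 : k2 a < k2 b <;>
    simp [h1, h2, h3] <;> omega

-- the bucket dict: values of L grouped under their second component, in L order
theorem pv_buckets_getD (L : List (Int × Int)) (b0 : PySem.Dict Int (List Int)) (c : Int) :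
    (L.foldl (fun (b : PySem.Dict Int (List Int)) p => b.modify p.2 [] (· ++ [p.1])) b0).getD c []
      = b0.getD c [] ++ (L.filter (fun p => p.2 == c)).map (·.1) := by
  induction L generalizing b0 with
  | nil => simp
  | cons p L ih =>
    simp only [List.foldl_cons, ih, List.filter_cons]
    by_cases h : p.2 = c
    · subst h
      simp [PySem.Dict.getD_modify_self]
    · have : (p.2 == c) = false := by simp [h]
      simp [this, PySem.Dict.getD_modify_of_ne _ _ _ (by simpa using Ne.symm h)]

-- componentwise permutations give a permutation of the flatMaps
theorem pv_perm_flatMap {α β : Type} (cs : List α) (f g : α → List β)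
    (h : ∀ c ∈ cs, (f c).Perm (g c)) : (cs.flatMap f).Perm (cs.flatMap g) := by
  induction cs with
  | nil => simp
  | cons c cs ih =>
    simp only [List.flatMap_cons]
    exact (h c (by simp)).append (ih (fun x hx => h x (by simp [hx])))

-- grouping: splitting L by its second component along a duplicate-free cover is a permutation
theorem pv_group_perm (cs : List Int) (L : List (Int × Int)) (hnd : cs.Nodup)
    (hcov : ∀ p ∈ L, p.2 ∈ cs) :
    (cs.flatMap (fun c => L.filter (fun p => p.2 == c))).Perm L := by
  induction cs generalizing L with
  | nil =>
    have : L = [] := by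
      cases L with
      | nil => rfl
      | cons p L => exact absurd (hcov p (by simp)) (by simp)
    simp [this]
  | cons c cs ih =>
    simp only [List.flatMap_cons]
    have hstep : (cs.flatMap (fun c' => L.filter (fun p => p.2 == c')))
        = cs.flatMap (fun c' => (L.filter (fun p => !(p.2 == c))).filter (fun p => p.2 == c')) := by
      apply List.flatMap_congr
      intro c' hc'
      have hne : c' ≠ c := by rintro rfl; exact (List.nodup_cons.mp hnd).1 hc'
      rw [List.filter_filter]
      apply List.filter_congr
      intro p _
      by_cases h : p.2 = c' <;> simp [h, hne]
    have h2 : (cs.flatMap (fun c' => L.filter (fun p => p.2 == c'))).Perm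
        (L.filter (fun p => !(p.2 == c))) := by
      rw [hstep]
      apply ih _ (List.nodup_cons.mp hnd).2
      intro p hp
      rcases List.mem_filter.mp hp with ⟨hpL, hpc⟩
      rcases List.mem_cons.mp (hcov p hpL) with hc | hc
      · simp [hc] at hpc
      · exact hc
    exact ((List.Perm.refl (L.filter (fun p => p.2 == c))).append h2).trans
      (List.filter_append_perm (fun p => p.2 == c) L)

-- the sorted (value,count) item list of a counter, grouped by count then value
theorem pv_sorted_items (u : List Int) (se : Int) (hlen : (u.length : Int) ≤ se) :
    PySem.List.sorted (PySem.Dict.counter u).items (fun x => toLex (x.2, x.1)) false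
      = (PySem.List.pyRange 1 (se + 1) 1).flatMap (fun c =>
          (PySem.List.sorted (((PySem.Dict.counter u).items.filter (fun p => p.2 == c)).map (·.1))
            (fun x => x) false).map (fun v => (v, c))) := by
  set L := (PySem.Dict.counter u).items with hLdef
  have hL : L = (PySem.Set.ofList u).map (fun k => (k, (u.count k : Int))) := PySem.Dict.items_counter u
  have hfst : L.map (·.1) = PySem.Set.ofList u := by
    rw [hL, List.map_map]; exact List.map_id'' (fun _ => rfl) _
  have hnodupfst : (L.map (·.1)).Nodup := by rw [hfst]; exact PySem.Set.nodup_ofList u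
  have hcnt : ∀ p ∈ L, p.2 ∈ PySem.List.pyRange 1 (se + 1) 1 := by
    intro p hp
    rw [hL] at hp
    rcases List.mem_map.mp hp with ⟨k, hk, rfl⟩
    rw [PySem.Set.mem_ofList] at hk
    rw [PySem.List.mem_pyRange_one]
    have h1 : 0 < u.count k := List.count_pos_iff.mpr hk
    have h2 : u.count k ≤ u.length := List.count_le_length
    constructor
    · simpa using h1
    · have : (u.count k : Int) ≤ (u.length : Int) := by exact_mod_cast h2
      omega
  have hbnodup : ∀ c : Int, ((L.filter (fun p => p.2 == c)).map (·.1)).Nodup := by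
    intro c
    exact List.Sublist.nodup (List.Sublist.map (fun p : Int × Int => p.1) (List.filter_sublist (p := fun p => p.2 == c) (l := L))) hnodupfst
  apply PySem.List.sorted_eq_of_perm_of_pairwise_lt
  · -- permutation
    have hstep : ∀ c ∈ PySem.List.pyRange 1 (se + 1) 1,
        ((PySem.List.sorted ((L.filter (fun p => p.2 == c)).map (·.1)) (fun x => x) false).map
          (fun v => (v, c))).Perm (L.filter (fun p => p.2 == c)) := by
      intro c _
      have h1 := (PySem.List.sorted_perm ((L.filter (fun p => p.2 == c)).map (·.1)) (fun x => x) false).map (fun v => (v, c))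
      have h2 : ((L.filter (fun p => p.2 == c)).map (·.1)).map (fun v => (v, c))
          = L.filter (fun p => p.2 == c) := by
        rw [List.map_map]
        have : ∀ p ∈ L.filter (fun p => p.2 == c), ((fun v => (v, c)) ∘ (·.1)) p = id p := by
          intro p hp
          have := (List.mem_filter.mp hp).2
          have hpc : p.2 = c := by simpa using this
          simp [Function.comp, ← hpc]
        rw [List.map_congr_left this, List.map_id]
      rw [h2] at h1
      exact h1
    exact (pv_perm_flatMap _ _ _ hstep).trans
      (pv_group_perm _ L (PySem.List.nodup_pyRange_one 1 (se + 1)) hcnt)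
  · -- pairwise strictly increasing under the lexicographic key
    rw [List.pairwise_flatMap]
    constructor
    · intro c _
      rw [List.pairwise_map]
      have hle := PySem.List.sorted_pairwise ((L.filter (fun p => p.2 == c)).map (·.1)) (fun x => x)
      have hnd : (PySem.List.sorted ((L.filter (fun p => p.2 == c)).map (·.1)) (fun x => x) false).Nodup :=
        ((PySem.List.sorted_perm _ _ _).nodup_iff).mpr (hbnodup c)
      refine (hle.and hnd).imp ?_
      rintro a b ⟨h1, h2⟩
      rw [Prod.Lex.toLex_lt_toLex]
      right
      exact ⟨rfl, lt_of_le_of_ne h1 h2⟩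
    · refine (PySem.List.pairwise_lt_pyRange_one 1 (se + 1)).imp ?_
      rintro c₁ c₂ hlt x hx y hy
      rcases List.mem_map.mp hx with ⟨v, _, rfl⟩
      rcases List.mem_map.mp hy with ⟨w, _, rfl⟩
      rw [Prod.Lex.toLex_lt_toLex]
      left
      exact hlt

theorem pv_row_eq (B : List (List Int)) (se : Int) (i : Int)
    (hrow : se ≤ ((PySem.List.pyGetD B i []).length : Int)) :
    funcRow B se i = funcRowAlt B se i := by
  unfold funcRow funcRowAlt
  set row := PySem.List.pyGetD B i [] with hrowdef
  set u : List Int := (row.take se.toNat).filter (fun v => decide (v ≠ 0)) with hudef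
  -- A's dict is Counter(u)
  have hdA : (PySem.List.pyRange 0 se 1).foldl (fun (d : PySem.Dict Int Int) j =>
      if PySem.List.pyGetD row j 0 ≠ 0 then
        if d.contains (PySem.List.pyGetD row j 0) then
          d.modify (PySem.List.pyGetD row j 0) 0 (· + 1)
        else d.insert (PySem.List.pyGetD row j 0) 1
      else d) PySem.Dict.empty = PySem.Dict.counter u := by
    have h1 := pv_foldl_range_get row se hrow
      (fun (d : PySem.Dict Int Int) v =>
        if v ≠ 0 then
          if d.contains v then d.modify v 0 (· + 1) else d.insert v 1
        else d) PySem.Dict.empty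
    rw [h1]
    rw [pv_foldl_filter_if (fun v : Int => v ≠ 0)
      (fun (d : PySem.Dict Int Int) v =>
        if d.contains v then d.modify v 0 (· + 1) else d.insert v 1) _ PySem.Dict.empty]
    rw [PySem.List.foldl_congr_mem _ _ (fun (d : PySem.Dict Int Int) v => d.modify v 0 (· + 1)) _
      (fun d v _ => pv_dictA_step d v)]
    rfl
  -- B's dict is Counter(u)
  have hdB : (PySem.List.pyRange 0 se 1).foldl (fun (d : PySem.Dict Int Int) j =>
      let v := PySem.List.pyGetD row j 0
      if v ≠ 0 then d.insert v (d.getD v 0 + 1) else d) PySem.Dict.empty = PySem.Dict.counter u := by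
    have h1 := pv_foldl_range_get row se hrow
      (fun (d : PySem.Dict Int Int) v =>
        if v ≠ 0 then d.insert v (d.getD v 0 + 1) else d) PySem.Dict.empty
    rw [h1]
    rw [pv_foldl_filter_if (fun v : Int => v ≠ 0)
      (fun (d : PySem.Dict Int Int) v => d.insert v (d.getD v 0 + 1)) _ PySem.Dict.empty]
    exact PySem.Dict.foldl_insert_getD_add_one_eq_counter u
  rw [hdA, hdB]
  dsimp only
  -- bucket lookups
  have hbk : ∀ c : Int, ((PySem.Dict.counter u).items.foldl
      (fun (b : PySem.Dict Int (List Int)) p => b.modify p.2 [] (· ++ [p.1])) PySem.Dict.empty).getD c []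
      = ((PySem.Dict.counter u).items.filter (fun p => p.2 == c)).map (·.1) := by
    intro c
    rw [pv_buckets_getD]
    simp
  -- the flattened, sorted row is the bucket scan
  by_cases hse : se ≤ 0
  · have ht : se.toNat = 0 := Int.toNat_of_nonpos hse
    have hu : u = [] := by rw [hudef, ht]; simp
    have hr : PySem.List.pyRange 1 (se + 1) 1 = [] := PySem.List.pyRange_one_eq_nil (by omega)
    rw [hu, hr]
    rfl
  · have hlen : (u.length : Int) ≤ se := by
      have h1 : u.length ≤ (row.take se.toNat).length := List.length_filter_le _ _
      have h2 : (row.take se.toNat).length ≤ se.toNat := by simp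
      omega
    rw [pv_sorted2_eq_sorted_lex, pv_sorted_items u se hlen]
    have hflat : ((PySem.List.pyRange 1 (se + 1) 1).flatMap (fun c =>
          (PySem.List.sorted (((PySem.Dict.counter u).items.filter (fun p => p.2 == c)).map (·.1))
            (fun x => x) false).map (fun v => (v, c)))).flatMap (fun l => [l.1, l.2])
        = (PySem.List.pyRange 1 (se + 1) 1).flatMap (fun c =>
          (PySem.List.sorted (((PySem.Dict.counter u).items.filter (fun p => p.2 == c)).map (·.1))
            (fun x => x) false).flatMap (fun v => [v, c])) := by
      rw [List.flatMap_assoc]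
      apply List.flatMap_congr
      intro c _
      rw [List.flatMap_map]
    rw [hflat]
    have hloop : (PySem.List.pyRange 1 (se + 1) 1).foldl (fun acc c =>
        (PySem.List.sorted (((PySem.Dict.counter u).items.foldl
            (fun (b : PySem.Dict Int (List Int)) p => b.modify p.2 [] (· ++ [p.1]))
            PySem.Dict.empty).getD c []) (fun x => x) false).foldl (fun a v => a ++ [v, c]) acc) []
        = (PySem.List.pyRange 1 (se + 1) 1).flatMap (fun c =>
          (PySem.List.sorted (((PySem.Dict.counter u).items.filter (fun p => p.2 == c)).map (·.1))
            (fun x => x) false).flatMap (fun v => [v, c])) := by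
      rw [PySem.List.foldl_congr_mem _ _
        (fun (acc : List Int) c =>
          acc ++ (PySem.List.sorted (((PySem.Dict.counter u).items.filter (fun p => p.2 == c)).map (·.1))
            (fun x => x) false).flatMap (fun v => [v, c])) _
        (by
          intro acc c _
          rw [hbk c]
          exact PySem.List.foldl_append_eq_flatMap _ _ acc)]
      rw [PySem.List.foldl_append_eq_flatMap]
      simp
    rw [hloop]
    -- truncation: A caps only when longer than 100, B always slices
    set R : List Int := (PySem.List.pyRange 1 (se + 1) 1).flatMap (fun c =>
        (PySem.List.sorted (((PySem.Dict.counter u).items.filter (fun p => p.2 == c)).map (·.1))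
          (fun x => x) false).flatMap (fun v => [v, c])) with hRdef
    by_cases hcap : (R.length : Int) > 100
    · simp [hcap]
    · simp only [hcap, if_false]
      rw [PySem.List.slice_to R (by omega)]
      have : R.length ≤ (100 : Int).toNat := by omega
      rw [List.take_of_length_le this]

-- writing slot i of pre ++ s :: suf, where i = len pre
theorem pv_set_len {α : Type} (pre : List α) (s : α) (suf : List α) (v : α) :
    (pre ++ s :: suf).set pre.length v = pre ++ v :: suf := by
  induction pre with
  | nil => rfl
  | cons x pre ih => simp [List.set_cons_succ, ih]

theorem pv_getD_len {α : Type} (pre : List α) (s : α) (suf : List α) (d : α) :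
    (pre ++ s :: suf).getD pre.length d = s := by
  induction pre with
  | nil => rfl
  | cons x pre ih => simpa using ih

-- A's first loop: writes slot i of the prefilled list with the row for line i
theorem pv_setLoop (g : Int → List Int) (a b : Int) (pre suf : List (List Int)) (m : Int)
    (hpre : (pre.length : Int) = a) (hsuf : (suf.length : Int) = b - a) :
    (PySem.List.pyRange a b 1).foldl (fun (st : List (List Int) × Int) i =>
        (PySem.List.pySetD st.1 i (g i),
         if ((g i).length : Int) > st.2 then ((g i).length : Int) else st.2)) (pre ++ suf, m)
      = (pre ++ (PySem.List.pyRange a b 1).map g,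
         (PySem.List.pyRange a b 1).foldl
           (fun mm i => if ((g i).length : Int) > mm then ((g i).length : Int) else mm) m) := by
  induction suf generalizing pre a m with
  | nil =>
    have hba : b ≤ a := by simp at hsuf; omega
    simp [PySem.List.pyRange_one_eq_nil hba]
  | cons s suf ih =>
    have hab : a < b := by simp at hsuf; omega
    rw [PySem.List.pyRange_one_cons hab]
    simp only [List.foldl_cons, List.map_cons]
    have hset : PySem.List.pySetD (pre ++ s :: suf) a (g a) = (pre ++ [g a]) ++ suf := by
      rw [← hpre, PySem.List.pySetD_natCast, pv_set_len]
      simp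
    rw [hset]
    have hih := ih (a + 1) (pre ++ [g a]) (if ((g a).length : Int) > m then ((g a).length : Int) else m)
      (by simp; omega) (by simp at hsuf ⊢; omega)
    rw [hih]
    simp

-- A's second loop: pads each slot using only that slot's current value
theorem pv_padLoop (m a b : Int) (pre suf : List (List Int))
    (hpre : (pre.length : Int) = a) (hsuf : (suf.length : Int) = b - a) :
    (PySem.List.pyRange a b 1).foldl (fun nl i =>
        if m - ((PySem.List.pyGetD nl i []).length : Int) > 0 then
          PySem.List.pySetD nl i (PySem.List.pyGetD nl i [] ++ PySem.List.pyRepeat [(0 : Int)] (m - ((PySem.List.pyGetD nl i []).length : Int)))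
        else nl) (pre ++ suf)
      = pre ++ suf.map (fun r =>
          if m - (r.length : Int) > 0 then r ++ PySem.List.pyRepeat [(0 : Int)] (m - (r.length : Int)) else r) := by
  induction suf generalizing pre a with
  | nil =>
    have hba : b ≤ a := by simp at hsuf; omega
    simp [PySem.List.pyRange_one_eq_nil hba]
  | cons s suf ih =>
    have hab : a < b := by simp at hsuf; omega
    rw [PySem.List.pyRange_one_cons hab]
    simp only [List.foldl_cons, List.map_cons]
    have hget : PySem.List.pyGetD (pre ++ s :: suf) a [] = s := by
      rw [← hpre, PySem.List.pyGetD_natCast, pv_getD_len]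
    rw [hget]
    by_cases hc : m - (s.length : Int) > 0
    · have hset : PySem.List.pySetD (pre ++ s :: suf) a (s ++ PySem.List.pyRepeat [(0 : Int)] (m - (s.length : Int)))
          = (pre ++ [s ++ PySem.List.pyRepeat [(0 : Int)] (m - (s.length : Int))]) ++ suf := by
        rw [← hpre, PySem.List.pySetD_natCast, pv_set_len]
        simp
      simp only [hc, if_true, hset]
      rw [ih (a := a + 1) (pre := pre ++ [s ++ PySem.List.pyRepeat [(0 : Int)] (m - (s.length : Int))]) (by simp; omega) (by simp at hsuf ⊢; omega)]
      simp
    · simp only [hc, if_false]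
      have : pre ++ s :: suf = (pre ++ [s]) ++ suf := by simp
      rw [this, ih (a := a + 1) (pre := pre ++ [s]) (by simp; omega) (by simp at hsuf ⊢; omega)]
      simp

-- ===== VERDICT (by name: the statement is the Claim_ definition above) =====
theorem func_spec : Claim_equal_func := by
  intro B ga se _ hpre
  show func B ga se = func_alt B ga se
  unfold func func_alt
  dsimp only
  by_cases hga : ga ≤ 0
  · rw [PySem.List.pyRange_one_eq_nil hga]
    rfl
  · replace hga : 0 < ga := by omega
    have hlen0 : (((PySem.List.pyRange 0 ga 1).map (fun _ => ([] : List Int))).length : Int) = ga - 0 := by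
      simp [PySem.List.length_pyRange_one]
      omega
    have h1 := pv_setLoop (funcRow B se) 0 ga [] ((PySem.List.pyRange 0 ga 1).map (fun _ => ([] : List Int))) 0
      (by simp) hlen0
    rw [List.nil_append, List.nil_append] at h1
    rw [h1]
    dsimp only
    have hlen1 : ((((PySem.List.pyRange 0 ga 1).map (funcRow B se))).length : Int) = ga - 0 := by
      simp [PySem.List.length_pyRange_one]
      omega
    have h2 := pv_padLoop ((PySem.List.pyRange 0 ga 1).foldl
        (fun mm i => if ((funcRow B se i).length : Int) > mm then ((funcRow B se i).length : Int) else mm) 0)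
      0 ga [] ((PySem.List.pyRange 0 ga 1).map (funcRow B se)) (by simp) hlen1
    rw [List.nil_append, List.nil_append] at h2
    rw [h2]
    -- the two row functions agree on every processed line
    have hrowpre : ∀ i ∈ PySem.List.pyRange 0 ga 1, se ≤ ((PySem.List.pyGetD B i []).length : Int) := by
      intro i hi
      rcases le_or_gt se 0 with hse | hse
      · have : (0 : Int) ≤ ((PySem.List.pyGetD B i []).length : Int) := by positivity
        omega
      replace hpre := hpre hse
      rw [PySem.List.mem_pyRange_one] at hi
      have hiB : i < (B.length : Int) := lt_of_lt_of_le hi.2 hpre.1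
      have hg : PySem.List.pyGetD B i [] = B[i.toNat]'(by omega) := by
        apply PySem.List.pyGetD_eq_getElem <;> omega
      rw [hg]
      apply hpre.2
      have htk : i.toNat < (B.take ga.toNat).length := by
        simp
        omega
      have : (B.take ga.toNat)[i.toNat]'htk = B[i.toNat]'(by omega) := List.getElem_take
      rw [← this]
      exact List.getElem_mem htk
    have hgr : (PySem.List.pyRange 0 ga 1).map (funcRow B se)
        = (PySem.List.pyRange 0 ga 1).map (fun i => funcRowAlt B se i) :=
      List.map_congr_left (fun i hi => pv_row_eq B se i (hrowpre i hi))
    -- the running maximum is the fold of max over the finished rows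
    have hmax : (PySem.List.pyRange 0 ga 1).foldl
        (fun mm i => if ((funcRow B se i).length : Int) > mm then ((funcRow B se i).length : Int) else mm) 0
        = ((PySem.List.pyRange 0 ga 1).map (fun i => funcRowAlt B se i)).foldl
            (fun m r => max m ((r.length : Int))) 0 := by
      rw [List.foldl_map]
      apply PySem.List.foldl_congr_mem
      intro acc i hi
      rw [pv_row_eq B se i (hrowpre i hi)]
      omega
    rw [hgr, hmax]
    -- padding: the guarded in-place pad is the unconditional replicate pad
    apply congrArg (fun z => (z, ga, _))
    apply List.map_congr_left
    intro r _
    by_cases hc : ((PySem.List.pyRange 0 ga 1).map (fun i => funcRowAlt B se i)).foldl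
        (fun m r => max m ((r.length : Int))) 0 - (r.length : Int) > 0
    · simp only [hc, if_true, PySem.List.pyRepeat_singleton]
    · simp only [hc, if_false]
      have : (((PySem.List.pyRange 0 ga 1).map (fun i => funcRowAlt B se i)).foldl
          (fun m r => max m ((r.length : Int))) 0 - (r.length : Int)).toNat = 0 := by omega
      rw [this]
      simp
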